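-- pv_equiv track=rewrite | github.com/biocentral/biocentral_server | tests/scripts/metamorphic_relations.py | _create_batch
-- ===== SOURCE A (Python) =====
-- from typing import Any, Callable, Dict, List, Optional, Protocol, Tuple, Union
--
-- def _create_batch(
--
--     target: str,
--     fillers: List[str],
--     batch_size: int,
--     target_position: str,
-- ) -> List[str]:
--     """Create a batch with target at specified position."""
--     if batch_size == 1:
--         return [target]
--
--     n_fillers = batch_size - 1
--     selected_fillers = [fillers[i % len(fillers)] for i in range(n_fillers)]
--
--     if target_position == "first":
--         return [target] + selected_fillers
--     elif target_position == "last":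
--         return selected_fillers + [target]
--     else:  # middle
--         mid = len(selected_fillers) // 2
--         return selected_fillers[:mid] + [target] + selected_fillers[mid:]
-- ===== SOURCE B (Python) =====
-- from typing import List
--
--
-- def _create_batch(
--     target: str,
--     fillers: List[str],
--     batch_size: int,
--     target_position: str,
-- ) -> List[str]:
--     """Create a batch with target at specified position (single-pass build)."""
--     if batch_size <= 1:
--         return [target]
--
--     if target_position == "first":
--         t = 0
--     elif target_position == "last":
--         t = batch_size - 1
--     else:  # middle
--         t = (batch_size - 1) // 2
--
--     return [
--         target if j == t else fillers[(j if j < t else j - 1) % len(fillers)]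
--         for j in range(batch_size)
--     ]
-- ===== Notes on version B (the rewrite author's own statement) =====
-- stated objective: alternative
-- what changed: Replaces build-fillers-list-then-concatenate-slices with a single pass over range(batch_size) that computes the target's destination index and emits either the target or the cyclic filler for each slot directly.
import Mathlib
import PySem

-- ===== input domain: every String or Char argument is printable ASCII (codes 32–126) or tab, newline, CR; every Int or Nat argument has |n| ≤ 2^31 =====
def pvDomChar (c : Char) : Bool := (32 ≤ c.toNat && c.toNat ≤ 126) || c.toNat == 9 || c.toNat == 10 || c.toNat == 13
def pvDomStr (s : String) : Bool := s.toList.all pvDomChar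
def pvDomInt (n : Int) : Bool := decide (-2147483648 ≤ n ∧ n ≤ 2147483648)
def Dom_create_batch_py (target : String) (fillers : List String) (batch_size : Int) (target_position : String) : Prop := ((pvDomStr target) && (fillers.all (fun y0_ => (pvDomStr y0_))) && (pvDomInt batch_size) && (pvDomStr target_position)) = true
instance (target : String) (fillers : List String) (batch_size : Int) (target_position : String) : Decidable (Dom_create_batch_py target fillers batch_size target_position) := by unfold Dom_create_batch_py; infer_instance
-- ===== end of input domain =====

-- B replaces A's build-fillers-then-concatenate-slices strategy by a single pass that
-- computes the target's destination index and decides each slot's value directly (alternative decomposition, same cost).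

-- ===== PORT A =====
def create_batch_py (target : String) (fillers : List String) (batch_size : Int) (target_position : String) : List String :=
  if batch_size = 1 then [target]
  else
    let n_fillers := batch_size - 1
    let selected_fillers := (PySem.List.pyRange 0 n_fillers 1).map
      (fun i => PySem.List.pyGetD fillers (PySem.Int.mod i (fillers.length : Int)) "")
    if target_position = "first" then [target] ++ selected_fillers
    else if target_position = "last" then selected_fillers ++ [target]
    else
      let mid := PySem.Int.floordiv (selected_fillers.length : Int) 2
      PySem.List.slice selected_fillers none (some mid) ++ [target] ++
        PySem.List.slice selected_fillers (some mid) none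

-- ===== PORT B =====
def create_batch_py_alt (target : String) (fillers : List String) (batch_size : Int) (target_position : String) : List String :=
  if batch_size ≤ 1 then [target]
  else
    let t : Int :=
      if target_position = "first" then 0
      else if target_position = "last" then batch_size - 1
      else PySem.Int.floordiv (batch_size - 1) 2
    (PySem.List.pyRange 0 batch_size 1).map (fun j =>
      if j = t then target
      else PySem.List.pyGetD fillers (PySem.Int.mod (if j < t then j else j - 1) (fillers.length : Int)) "")

-- ===== PRECONDITION & SPEC =====
-- Pre_ excludes exactly the inputs where Python A raises ZeroDivisionError
-- (empty fillers with batch_size > 1, from 'i % len(fillers)'); B raises there too.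
def Pre_create_batch_py (target : String) (fillers : List String) (batch_size : Int) (target_position : String) : Prop :=
  fillers ≠ [] ∨ batch_size ≤ 1

instance (target : String) (fillers : List String) (batch_size : Int) (target_position : String) : Decidable (Pre_create_batch_py target fillers batch_size target_position) := by unfold Pre_create_batch_py; infer_instance

def pvWitness_create_batch_py : String × List String × Int × String := ("T", ["f0", "f1"], 5, "middle")

def Spec_create_batch_py (target : String) (fillers : List String) (batch_size : Int) (target_position : String) (out : List String) : Prop := out = create_batch_py_alt target fillers batch_size target_position
instance (target : String) (fillers : List String) (batch_size : Int) (target_position : String) (out : List String) : Decidable (Spec_create_batch_py target fillers batch_size target_position out) := by unfold Spec_create_batch_py; infer_instance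

-- ===== CLAIM (what is proved, stated in full; the proofs are below) =====
def Claim_equal_create_batch_py : Prop := ∀ (target : String) (fillers : List String) (batch_size : Int) (target_position : String), Dom_create_batch_py target fillers batch_size target_position → Pre_create_batch_py target fillers batch_size target_position → Spec_create_batch_py target fillers batch_size target_position (create_batch_py target fillers batch_size target_position)

-- ===== LEMMAS AND PROOFS =====

-- B's single pass over range(n), with the target at index t, splits into
-- "fillers before t", the target, and "fillers after t (shifted by one)".
lemma alt_pass_split (target : String) (f : Int → String) (n t : Int)
    (h0 : 0 ≤ t) (ht : t ≤ n - 1) :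
    (PySem.List.pyRange 0 n 1).map
      (fun j => if j = t then target else f (if j < t then j else j - 1))
    = (PySem.List.pyRange 0 t 1).map f ++ [target] ++ (PySem.List.pyRange t (n - 1) 1).map f := by
  have hsplit := PySem.List.pyRange_one_append 0 t n h0 (by omega)
  rw [hsplit, PySem.List.pyRange_one_cons (show t < n by omega)]
  rw [List.map_append, List.map_cons]
  have h1 : (PySem.List.pyRange 0 t 1).map
      (fun j => if j = t then target else f (if j < t then j else j - 1))
      = (PySem.List.pyRange 0 t 1).map f := by
    apply List.map_congr_left
    intro j hj
    rw [PySem.List.mem_pyRange_one] at hj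
    simp [show j ≠ t by omega, show j < t by omega]
  have h2 : (PySem.List.pyRange (t + 1) n 1).map
      (fun j => if j = t then target else f (if j < t then j else j - 1))
      = (PySem.List.pyRange t (n - 1) 1).map f := by
    have hlen : (n - (t + 1)).toNat = (n - 1 - t).toNat := by omega
    rw [PySem.List.pyRange_one (t + 1) n, PySem.List.pyRange_one t (n - 1), hlen,
      List.map_map, List.map_map]
    apply List.map_congr_left
    intro k _hk
    simp only [Function.comp_apply]
    rw [if_neg (by omega), if_neg (by omega)]
    congr 1
    omega
  rw [h1, h2]
  simp

-- length of the selected-fillers list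
lemma len_sel (f : Int → String) (m : Int) :
    ((PySem.List.pyRange 0 m 1).map f).length = m.toNat := by
  rw [List.length_map, PySem.List.length_pyRange_one]
  omega

-- ===== VERDICT (by name: the statement is the Claim_ definition above) =====
theorem create_batch_py_spec : Claim_equal_create_batch_py := by
  intro target fillers batch_size target_position _hdom hpre
  unfold Spec_create_batch_py create_batch_py create_batch_py_alt
  by_cases hle : batch_size ≤ 1
  · -- degenerate: A's selected_fillers is empty, every branch returns [target]
    rw [if_pos hle]
    by_cases h1 : batch_size = 1
    · rw [if_pos h1]
    · rw [if_neg h1]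
      have hnil : PySem.List.pyRange 0 (batch_size - 1) 1 = [] :=
        PySem.List.pyRange_one_eq_nil (by omega)
      simp only [hnil, List.map_nil]
      split_ifs <;> simp [PySem.List.slice]
  · rw [if_neg hle, if_neg (show ¬ batch_size = 1 by omega)]
    have hn2 : 2 ≤ batch_size := by omega
    set n := batch_size with hn
    set f : Int → String :=
      fun i => PySem.List.pyGetD fillers (PySem.Int.mod i (fillers.length : Int)) "" with hf
    by_cases hfirst : target_position = "first"
    · rw [if_pos hfirst, if_pos hfirst,
        alt_pass_split target f n 0 le_rfl (by omega)]
      simp [PySem.List.pyRange_zero]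
    · rw [if_neg hfirst, if_neg hfirst]
      by_cases hlast : target_position = "last"
      · rw [if_pos hlast, if_pos hlast,
          alt_pass_split target f n (n - 1) (by omega) le_rfl]
        rw [PySem.List.pyRange_one_eq_nil (le_refl (n - 1))]
        simp
      · rw [if_neg hlast, if_neg hlast]
        -- middle: A's mid equals B's target index t
        set N : Nat := (n - 1).toNat with hN
        have hNlen : ((PySem.List.pyRange 0 (n - 1) 1).map f).length = N := len_sel f (n - 1)
        have hmid : PySem.Int.floordiv ((((PySem.List.pyRange 0 (n - 1) 1).map f).length : Nat) : Int) 2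
            = ((N / 2 : Nat) : Int) := by
          rw [hNlen]
          exact_mod_cast PySem.Int.floordiv_natCast N 2
        set t : Int := PySem.Int.floordiv (n - 1) 2 with hT
        have htN : t = ((N / 2 : Nat) : Int) := by
          rw [hT, PySem.Int.floordiv_eq_ediv_of_pos (by omega : (0:Int) < 2)]
          omega
        have h0t : 0 ≤ t := by rw [htN]; exact Int.natCast_nonneg _
        have htn : t ≤ n - 1 := by
          rw [htN]
          have : N / 2 ≤ N := Nat.div_le_self N 2
          omega
        rw [alt_pass_split target f n t h0t htn]
        have hsp := PySem.List.pyRange_one_append 0 t (n - 1) h0t htn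
        have hlent : ((PySem.List.pyRange 0 t 1).map f).length = N / 2 := by
          rw [List.length_map, PySem.List.length_pyRange_one]
          omega
        have htake : PySem.List.slice ((PySem.List.pyRange 0 (n - 1) 1).map f) none (some ((N / 2 : Nat) : Int))
            = (PySem.List.pyRange 0 t 1).map f := by
          rw [PySem.List.slice_to_natCast, hsp, List.map_append, List.take_left' hlent]
        have hdrop : PySem.List.slice ((PySem.List.pyRange 0 (n - 1) 1).map f) (some ((N / 2 : Nat) : Int)) none
            = (PySem.List.pyRange t (n - 1) 1).map f := by
          rw [PySem.List.slice_from_natCast, hsp, List.map_append, List.drop_left' hlent]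
        simp only [hmid, htake, hdrop]
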